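-- pv_equiv track=rewrite | github.com/phatakshaunak/scaler_academy | DSA_Problem_Solving/String_Algorithms/boring_substring.py | solve
-- ===== SOURCE A (Python) =====
-- def solve(A):
--
--     '''
--     Separate odd and even asci value characters into two arrays
--     Sort both arrays
--     Check if last of first and first of second are not consecutive for
--     both concatenation arrangements, if yes return true.
--     '''
--
--     odd = [char for char in A if ord(char)&1]
--     even = [char for char in A if not ord(char)&1]
--
--     odd.sort()
--     even.sort()
--
--     if abs(ord(odd[-1]) - ord(even[0])) > 1 or abs(ord(even[-1]) - ord(odd[0])) > 1:
--         return 1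
--
--     return 0
-- ===== SOURCE B (Python) =====
-- def solve(A):
--     omin = omax = emin = emax = None
--     for ch in A:
--         v = ord(ch)
--         if v & 1:
--             if omin is None:
--                 omin = omax = v
--             else:
--                 if v < omin:
--                     omin = v
--                 if v > omax:
--                     omax = v
--         else:
--             if emin is None:
--                 emin = emax = v
--             else:
--                 if v < emin:
--                     emin = v
--                 if v > emax:
--                     emax = v
--     return 1 if abs(omax - emin) > 1 or abs(emax - omin) > 1 else 0
-- ===== Notes on version B (the rewrite author's own statement) =====
-- stated objective: faster
-- what changed: Replaces building and sorting two lists (then indexing first/last) with a single pass that tracks the min and max ASCII value of each parity.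
import Mathlib
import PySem

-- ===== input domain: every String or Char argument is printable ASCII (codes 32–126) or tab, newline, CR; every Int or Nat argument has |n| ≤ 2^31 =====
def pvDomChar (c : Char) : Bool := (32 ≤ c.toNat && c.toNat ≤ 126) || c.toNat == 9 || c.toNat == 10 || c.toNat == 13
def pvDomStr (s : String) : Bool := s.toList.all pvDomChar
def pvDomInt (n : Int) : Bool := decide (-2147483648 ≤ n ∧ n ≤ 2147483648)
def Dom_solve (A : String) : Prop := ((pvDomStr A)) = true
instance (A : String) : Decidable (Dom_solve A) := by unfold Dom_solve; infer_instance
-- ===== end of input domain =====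

-- B replaces sort-then-index by a single pass tracking per-parity min/max ASCII values;
-- return value only (neither program mutates its argument).

-- ===== PORT A =====
-- ord(char) as Int
def ordI (c : Char) : Int := (c.toNat : Int)

-- ord(char)&1 (truthiness of the low bit)
def isOddC (c : Char) : Bool := c.toNat % 2 == 1

def solve (A : String) : Int :=
  let odd := A.toList.filter (fun c => isOddC c)
  let even := A.toList.filter (fun c => !(isOddC c))
  let odds := PySem.List.sorted odd (fun c => ordI c) false
  let evens := PySem.List.sorted even (fun c => ordI c) false
  -- odd[-1], even[0], even[-1], odd[0]; Python raises IndexError when a list is empty (excluded by Pre_)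
  match PySem.List.pyGet? odds (-1), PySem.List.pyGet? evens 0,
        PySem.List.pyGet? evens (-1), PySem.List.pyGet? odds 0 with
  | some o1, some e0, some e1, some o0 =>
      if 1 < |ordI o1 - ordI e0| ∨ 1 < |ordI e1 - ordI o0| then 1 else 0
  | _, _, _, _ => 0

-- ===== PORT B =====
-- 'if omin is None: omin = v' / 'if v < omin: omin = v'
def updMin (o : Option Int) (v : Int) : Option Int :=
  match o with
  | none => some v
  | some a => some (if v < a then v else a)

def updMax (o : Option Int) (v : Int) : Option Int :=
  match o with
  | none => some v
  | some a => some (if a < v then v else a)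

-- loop body of B: state (omin, omax, emin, emax)
def altStep (st : Option Int × Option Int × Option Int × Option Int) (c : Char) :
    Option Int × Option Int × Option Int × Option Int :=
  let v : Int := (c.toNat : Int)
  if c.toNat % 2 == 1 then
    (updMin st.1 v, updMax st.2.1 v, st.2.2.1, st.2.2.2)
  else
    (st.1, st.2.1, updMin st.2.2.1 v, updMax st.2.2.2 v)

def solve_alt (A : String) : Int :=
  let st := A.toList.foldl altStep (none, none, none, none)
  -- Python raises TypeError on None here (excluded by Pre_)
  match st.1 with
  | none => 0
  | some omin =>
    match st.2.1 with
    | none => 0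
    | some omax =>
      match st.2.2.1 with
      | none => 0
      | some emin =>
        match st.2.2.2 with
        | none => 0
        | some emax =>
          if 1 < |omax - emin| ∨ 1 < |emax - omin| then 1 else 0

-- ===== PRECONDITION & SPEC =====
-- Pre_ excludes exactly the inputs where A raises IndexError (no odd-ASCII char or no
-- even-ASCII char present); B raises TypeError there.
def Pre_solve (A : String) : Prop :=
  A.toList.filter (fun c => c.toNat % 2 == 1) ≠ [] ∧
  A.toList.filter (fun c => !(c.toNat % 2 == 1)) ≠ []
instance (A : String) : Decidable (Pre_solve A) := by unfold Pre_solve; infer_instance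

def pvWitness_solve : String := "ab"

def Spec_solve (A : String) (out : Int) : Prop := out = solve_alt A
instance (A : String) (out : Int) : Decidable (Spec_solve A out) := by unfold Spec_solve; infer_instance

-- ===== CLAIM (what is proved, stated in full; the proofs are below) =====
def Claim_equal_solve : Prop := ∀ (A : String), Dom_solve A → Pre_solve A → Spec_solve A (solve A)

-- ===== LEMMAS AND PROOFS =====

-- option-combining min/max
def oMin (a b : Option Int) : Option Int :=
  match a, b with
  | none, b => b
  | a, none => a
  | some x, some y => some (min x y)

def oMax (a b : Option Int) : Option Int :=
  match a, b with
  | none, b => b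
  | a, none => a
  | some x, some y => some (max x y)

-- spec values: min/max ord over each parity class
def mO : List Char → Option Int
  | [] => none
  | c :: cs => if isOddC c then oMin (some (ordI c)) (mO cs) else mO cs
def xO : List Char → Option Int
  | [] => none
  | c :: cs => if isOddC c then oMax (some (ordI c)) (xO cs) else xO cs
def mE : List Char → Option Int
  | [] => none
  | c :: cs => if !isOddC c then oMin (some (ordI c)) (mE cs) else mE cs
def xE : List Char → Option Int
  | [] => none
  | c :: cs => if !isOddC c then oMax (some (ordI c)) (xE cs) else xE cs

theorem updMin_eq (o : Option Int) (v : Int) : updMin o v = oMin (some v) o := by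
  cases o <;> simp [updMin, oMin, min_def] <;> split <;> split <;> omega

theorem updMax_eq (o : Option Int) (v : Int) : updMax o v = oMax (some v) o := by
  cases o <;> simp [updMax, oMax, max_def] <;> split <;> split <;> omega

theorem oMin_assoc (a b c : Option Int) : oMin (oMin a b) c = oMin a (oMin b c) := by
  cases a <;> cases b <;> cases c <;> simp [oMin, min_assoc]

theorem oMax_assoc (a b c : Option Int) : oMax (oMax a b) c = oMax a (oMax b c) := by
  cases a <;> cases b <;> cases c <;> simp [oMax, max_assoc]

theorem oMin_comm (a b : Option Int) : oMin a b = oMin b a := by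
  cases a <;> cases b <;> simp [oMin, min_comm]

theorem oMax_comm (a b : Option Int) : oMax a b = oMax b a := by
  cases a <;> cases b <;> simp [oMax, max_comm]

theorem oMin_left_comm (a b c : Option Int) : oMin a (oMin b c) = oMin b (oMin a c) := by
  rw [← oMin_assoc, oMin_comm a b, oMin_assoc]

theorem oMax_left_comm (a b c : Option Int) : oMax a (oMax b c) = oMax b (oMax a c) := by
  rw [← oMax_assoc, oMax_comm a b, oMax_assoc]

theorem foldl_altStep (cs : List Char) :
    ∀ st : Option Int × Option Int × Option Int × Option Int,
      cs.foldl altStep st = (oMin st.1 (mO cs), oMax st.2.1 (xO cs),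
                             oMin st.2.2.1 (mE cs), oMax st.2.2.2 (xE cs)) := by
  induction cs with
  | nil =>
      intro st
      obtain ⟨a, b, c, d⟩ := st
      cases a <;> cases b <;> cases c <;> cases d <;> simp [mO, xO, mE, xE, oMin, oMax]
  | cons c cs ih =>
      intro st
      simp only [List.foldl_cons, ih, altStep, mO, xO, mE, xE, isOddC, ordI]
      by_cases h : c.toNat % 2 = 1 <;>
        simp [h, updMin_eq, updMax_eq, oMin_assoc, oMax_assoc, oMin_left_comm, oMax_left_comm, oMin_comm, oMax_comm]

-- mO/xO/mE/xE are none exactly when the parity class is empty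
theorem mO_eq_none_iff (cs : List Char) :
    mO cs = none ↔ cs.filter (fun c => isOddC c) = [] := by
  induction cs with
  | nil => simp [mO]
  | cons c cs ih =>
      by_cases h : isOddC c = true <;>
        simp [mO, h, List.filter_cons, ih, oMin] <;> cases mO cs <;> simp [oMin]

theorem xO_eq_none_iff (cs : List Char) :
    xO cs = none ↔ cs.filter (fun c => isOddC c) = [] := by
  induction cs with
  | nil => simp [xO]
  | cons c cs ih =>
      by_cases h : isOddC c = true <;>
        simp [xO, h, List.filter_cons, ih, oMax] <;> cases xO cs <;> simp [oMax]

theorem mE_eq_none_iff (cs : List Char) :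
    mE cs = none ↔ cs.filter (fun c => !(isOddC c)) = [] := by
  induction cs with
  | nil => simp [mE]
  | cons c cs ih =>
      by_cases h : isOddC c = true <;>
        simp [mE, h, List.filter_cons, ih, oMin] <;> cases mE cs <;> simp [oMin]

theorem xE_eq_none_iff (cs : List Char) :
    xE cs = none ↔ cs.filter (fun c => !(isOddC c)) = [] := by
  induction cs with
  | nil => simp [xE]
  | cons c cs ih =>
      by_cases h : isOddC c = true <;>
        simp [xE, h, List.filter_cons, ih, oMax] <;> cases xE cs <;> simp [oMax]

-- mO/xO/mE/xE: attained bound on the parity class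
theorem mO_spec (cs : List Char) (m : Int) (h : mO cs = some m) :
    (∃ c ∈ cs.filter (fun c => isOddC c), ordI c = m) ∧
    ∀ c ∈ cs.filter (fun c => isOddC c), m ≤ ordI c := by
  induction cs generalizing m with
  | nil => simp [mO] at h
  | cons c cs ih =>
      by_cases hc : (isOddC c) = true
      · have hf : (c :: cs).filter (fun c => isOddC c) = c :: cs.filter (fun c => isOddC c) := by
          simp [List.filter_cons, hc]
        simp only [mO, hc, if_pos] at h
        cases hm : mO cs with
        | none =>
            rw [hm] at h; simp [oMin] at h
            subst h
            have hnil := (mO_eq_none_iff cs).mp hm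
            constructor
            · exact ⟨c, by rw [hf]; simp, rfl⟩
            · intro d hd
              rw [hf, hnil] at hd
              simp at hd
              subst hd
              exact le_refl _
        | some m' =>
            rw [hm] at h; simp [oMin] at h
            obtain ⟨⟨c', hc', hc'm⟩, hb⟩ := ih m' hm
            constructor
            · rcases le_total (ordI c) m' with hle | hle
              · exact ⟨c, by rw [hf]; simp, by omega⟩
              · exact ⟨c', by rw [hf]; simp [hc'], by omega⟩
            · intro d hd
              rw [hf] at hd
              rcases List.mem_cons.mp hd with hd | hd
              · subst hd; omega
              · have := hb d hd; omega
      · have hf : (c :: cs).filter (fun c => isOddC c) = cs.filter (fun c => isOddC c) := by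
          simp [List.filter_cons, hc]
        simp only [mO, hc, if_neg, Bool.false_eq_true, not_false_iff] at h
        rw [hf]
        exact ih m h

theorem xO_spec (cs : List Char) (m : Int) (h : xO cs = some m) :
    (∃ c ∈ cs.filter (fun c => isOddC c), ordI c = m) ∧
    ∀ c ∈ cs.filter (fun c => isOddC c), ordI c ≤ m := by
  induction cs generalizing m with
  | nil => simp [xO] at h
  | cons c cs ih =>
      by_cases hc : (isOddC c) = true
      · have hf : (c :: cs).filter (fun c => isOddC c) = c :: cs.filter (fun c => isOddC c) := by
          simp [List.filter_cons, hc]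
        simp only [xO, hc, if_pos] at h
        cases hm : xO cs with
        | none =>
            rw [hm] at h; simp [oMax] at h
            subst h
            have hnil := (xO_eq_none_iff cs).mp hm
            constructor
            · exact ⟨c, by rw [hf]; simp, rfl⟩
            · intro d hd
              rw [hf, hnil] at hd
              simp at hd
              subst hd
              exact le_refl _
        | some m' =>
            rw [hm] at h; simp [oMax] at h
            obtain ⟨⟨c', hc', hc'm⟩, hb⟩ := ih m' hm
            constructor
            · rcases le_total (ordI c) m' with hle | hle
              · exact ⟨c', by rw [hf]; simp [hc'], by omega⟩
              · exact ⟨c, by rw [hf]; simp, by omega⟩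
            · intro d hd
              rw [hf] at hd
              rcases List.mem_cons.mp hd with hd | hd
              · subst hd; omega
              · have := hb d hd; omega
      · have hf : (c :: cs).filter (fun c => isOddC c) = cs.filter (fun c => isOddC c) := by
          simp [List.filter_cons, hc]
        simp only [xO, hc, if_neg, Bool.false_eq_true, not_false_iff] at h
        rw [hf]
        exact ih m h

theorem mE_spec (cs : List Char) (m : Int) (h : mE cs = some m) :
    (∃ c ∈ cs.filter (fun c => !(isOddC c)), ordI c = m) ∧
    ∀ c ∈ cs.filter (fun c => !(isOddC c)), m ≤ ordI c := by
  induction cs generalizing m with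
  | nil => simp [mE] at h
  | cons c cs ih =>
      by_cases hc : (!(isOddC c)) = true
      · have hf : (c :: cs).filter (fun c => !(isOddC c)) = c :: cs.filter (fun c => !(isOddC c)) := by
          simp [List.filter_cons, hc]
        simp only [mE, hc, if_pos] at h
        cases hm : mE cs with
        | none =>
            rw [hm] at h; simp [oMin] at h
            subst h
            have hnil := (mE_eq_none_iff cs).mp hm
            constructor
            · exact ⟨c, by rw [hf]; simp, rfl⟩
            · intro d hd
              rw [hf, hnil] at hd
              simp at hd
              subst hd
              exact le_refl _
        | some m' =>
            rw [hm] at h; simp [oMin] at h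
            obtain ⟨⟨c', hc', hc'm⟩, hb⟩ := ih m' hm
            constructor
            · rcases le_total (ordI c) m' with hle | hle
              · exact ⟨c, by rw [hf]; simp, by omega⟩
              · exact ⟨c', by rw [hf]; simp [hc'], by omega⟩
            · intro d hd
              rw [hf] at hd
              rcases List.mem_cons.mp hd with hd | hd
              · subst hd; omega
              · have := hb d hd; omega
      · have hf : (c :: cs).filter (fun c => !(isOddC c)) = cs.filter (fun c => !(isOddC c)) := by
          simp [List.filter_cons, hc]
        simp only [mE, hc, if_neg, Bool.false_eq_true, not_false_iff] at h
        rw [hf]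
        exact ih m h

theorem xE_spec (cs : List Char) (m : Int) (h : xE cs = some m) :
    (∃ c ∈ cs.filter (fun c => !(isOddC c)), ordI c = m) ∧
    ∀ c ∈ cs.filter (fun c => !(isOddC c)), ordI c ≤ m := by
  induction cs generalizing m with
  | nil => simp [xE] at h
  | cons c cs ih =>
      by_cases hc : (!(isOddC c)) = true
      · have hf : (c :: cs).filter (fun c => !(isOddC c)) = c :: cs.filter (fun c => !(isOddC c)) := by
          simp [List.filter_cons, hc]
        simp only [xE, hc, if_pos] at h
        cases hm : xE cs with
        | none =>
            rw [hm] at h; simp [oMax] at h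
            subst h
            have hnil := (xE_eq_none_iff cs).mp hm
            constructor
            · exact ⟨c, by rw [hf]; simp, rfl⟩
            · intro d hd
              rw [hf, hnil] at hd
              simp at hd
              subst hd
              exact le_refl _
        | some m' =>
            rw [hm] at h; simp [oMax] at h
            obtain ⟨⟨c', hc', hc'm⟩, hb⟩ := ih m' hm
            constructor
            · rcases le_total (ordI c) m' with hle | hle
              · exact ⟨c', by rw [hf]; simp [hc'], by omega⟩
              · exact ⟨c, by rw [hf]; simp, by omega⟩
            · intro d hd
              rw [hf] at hd
              rcases List.mem_cons.mp hd with hd | hd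
              · subst hd; omega
              · have := hb d hd; omega
      · have hf : (c :: cs).filter (fun c => !(isOddC c)) = cs.filter (fun c => !(isOddC c)) := by
          simp [List.filter_cons, hc]
        simp only [xE, hc, if_neg, Bool.false_eq_true, not_false_iff] at h
        rw [hf]
        exact ih m h

-- the last element of a ≤-sorted list is an upper bound
theorem getLast_ub : ∀ (l : List Int), l.Pairwise (· ≤ ·) → ∀ (g : Int),
    l.getLast? = some g → ∀ x ∈ l, x ≤ g
  | [], _, g, hg => by simp at hg
  | [a], _, g, hg => by
      simp at hg; subst hg; simp
  | a :: b :: t, hp, g, hg => by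
      have hg' : (b :: t).getLast? = some g := by
        simpa [List.getLast?_cons_cons] using hg
      have hub := getLast_ub (b :: t) hp.of_cons g hg'
      intro x hx
      rcases List.mem_cons.mp hx with hx | hx
      · subst hx
        have hab : x ≤ b := (List.pairwise_cons.mp hp).1 b (by simp)
        have := hub b (by simp)
        omega
      · exact hub x hx

theorem solve_eq (A : String) (hpre : Pre_solve A) : solve A = solve_alt A := by
  obtain ⟨hodd', heven'⟩ := hpre
  have hodd : A.toList.filter (fun c => isOddC c) ≠ [] := by
    simpa [isOddC] using hodd'
  have heven : A.toList.filter (fun c => !(isOddC c)) ≠ [] := by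
    simpa [isOddC] using heven'
  set cs := A.toList with hcs
  -- B's fold
  have hfold := foldl_altStep cs (none, none, none, none)
  simp only [oMin, oMax] at hfold
  -- the four option values are some
  obtain ⟨mo, hmo⟩ : ∃ m, mO cs = some m := by
    cases h : mO cs
    · exact absurd ((mO_eq_none_iff cs).mp h) hodd
    · exact ⟨_, rfl⟩
  obtain ⟨xo, hxo⟩ : ∃ m, xO cs = some m := by
    cases h : xO cs
    · exact absurd ((xO_eq_none_iff cs).mp h) hodd
    · exact ⟨_, rfl⟩
  obtain ⟨me, hme⟩ : ∃ m, mE cs = some m := by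
    cases h : mE cs
    · exact absurd ((mE_eq_none_iff cs).mp h) heven
    · exact ⟨_, rfl⟩
  obtain ⟨xe, hxe⟩ : ∃ m, xE cs = some m := by
    cases h : xE cs
    · exact absurd ((xE_eq_none_iff cs).mp h) heven
    · exact ⟨_, rfl⟩
  -- A's sorted lists
  set oddL := cs.filter (fun c => isOddC c) with hoL
  set evenL := cs.filter (fun c => !(isOddC c)) with heL
  set os := PySem.List.sorted oddL (fun c => ordI c) false with hos
  set es := PySem.List.sorted evenL (fun c => ordI c) false with hes
  have hosne : os ≠ [] := by
    intro h; exact hodd ((PySem.List.sorted_eq_nil_iff _ _ _).mp h)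
  have hesne : es ≠ [] := by
    intro h; exact heven ((PySem.List.sorted_eq_nil_iff _ _ _).mp h)
  obtain ⟨o0, ot, hocons⟩ := List.exists_cons_of_ne_nil hosne
  obtain ⟨e0, et, hecons⟩ := List.exists_cons_of_ne_nil hesne
  obtain ⟨o1, ho1⟩ : ∃ g, os.getLast? = some g := by
    rw [hocons]; exact ⟨_, List.getLast?_eq_some_getLast (by simp)⟩
  obtain ⟨e1, he1⟩ : ∃ g, es.getLast? = some g := by
    rw [hecons]; exact ⟨_, List.getLast?_eq_some_getLast (by simp)⟩
  -- min equalities: ordI o0 = mo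
  have hperm_o : os.Perm oddL := PySem.List.sorted_perm ..
  have hperm_e : es.Perm evenL := PySem.List.sorted_perm ..
  obtain ⟨⟨cm, hcm, hcmv⟩, hmlb⟩ := mO_spec cs mo hmo
  obtain ⟨⟨cx, hcx, hcxv⟩, hxub⟩ := xO_spec cs xo hxo
  obtain ⟨⟨dm, hdm, hdmv⟩, helb⟩ := mE_spec cs me hme
  obtain ⟨⟨dx, hdx, hdxv⟩, heub⟩ := xE_spec cs xe hxe
  have ho0_le : ∀ y ∈ oddL, ordI o0 ≤ ordI y :=
    PySem.List.key_head_sorted_le (xs := oddL) (key := fun c => ordI c) (hos.symm.trans hocons)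
  have he0_le : ∀ y ∈ evenL, ordI e0 ≤ ordI y :=
    PySem.List.key_head_sorted_le (xs := evenL) (key := fun c => ordI c) (hes.symm.trans hecons)
  have ho0mem : o0 ∈ oddL := hperm_o.mem_iff.mp (by rw [hocons]; simp)
  have he0mem : e0 ∈ evenL := hperm_e.mem_iff.mp (by rw [hecons]; simp)
  have ho1mem : o1 ∈ oddL := hperm_o.mem_iff.mp (List.mem_of_getLast? ho1)
  have he1mem : e1 ∈ evenL := hperm_e.mem_iff.mp (List.mem_of_getLast? he1)
  have hopair : (os.map (fun c => ordI c)).Pairwise (· ≤ ·) :=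
    PySem.List.sorted_map_key_pairwise ..
  have hepair : (es.map (fun c => ordI c)).Pairwise (· ≤ ·) :=
    PySem.List.sorted_map_key_pairwise ..
  have ho1_ge : ∀ y ∈ oddL, ordI y ≤ ordI o1 := by
    intro y hy
    have hg : (os.map (fun c => ordI c)).getLast? = some (ordI o1) := by
      rw [List.getLast?_map, ho1]; rfl
    exact getLast_ub _ hopair _ hg (ordI y) (by
      exact List.mem_map_of_mem (hperm_o.mem_iff.mpr hy))
  have he1_ge : ∀ y ∈ evenL, ordI y ≤ ordI e1 := by
    intro y hy
    have hg : (es.map (fun c => ordI c)).getLast? = some (ordI e1) := by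
      rw [List.getLast?_map, he1]; rfl
    exact getLast_ub _ hepair _ hg (ordI y) (by
      exact List.mem_map_of_mem (hperm_e.mem_iff.mpr hy))
  have eq_mo : ordI o0 = mo := le_antisymm (by have := ho0_le cm hcm; omega) (hmlb o0 ho0mem)
  have eq_xo : ordI o1 = xo := le_antisymm (hxub o1 ho1mem) (by have := ho1_ge cx hcx; omega)
  have eq_me : ordI e0 = me := le_antisymm (by have := he0_le dm hdm; omega) (helb e0 he0mem)
  have eq_xe : ordI e1 = xe := le_antisymm (heub e1 he1mem) (by have := he1_ge dx hdx; omega)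
  -- assemble both sides
  have hA : solve A =
      (if 1 < |ordI o1 - ordI e0| ∨ 1 < |ordI e1 - ordI o0| then 1 else 0) := by
    simp only [solve, ← hcs, ← hoL, ← heL, ← hos, ← hes]
    rw [PySem.List.pyGet?_neg_one, PySem.List.pyGet?_neg_one, ho1, he1,
        hocons, hecons]
    simp [PySem.List.pyGet?_zero_cons]
  have hB : solve_alt A =
      (if 1 < |xo - me| ∨ 1 < |xe - mo| then 1 else 0) := by
    simp only [solve_alt, ← hcs]
    rw [hfold]
    rw [hmo, hxo, hme, hxe]
  rw [hA, hB, eq_mo, eq_xo, eq_me, eq_xe]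

-- ===== VERDICT (by name: the statement is the Claim_ definition above) =====
theorem solve_spec : Claim_equal_solve := by
  intro A _ hpre
  unfold Spec_solve
  exact solve_eq A hpre
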